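-- pv_equiv track=rewrite | github.com/beluu2/molderia- | prueba0/prueba_2local.ropa.py | generar_stock
-- ===== SOURCE A (Python) =====
-- def generar_stock (marcas,colores,talles) :
--     stock = []
--
--     for marca in marcas :
--         for color in colores:
--             for x in talles:
--                 producto = {"brand" : marca,"color": color, "talle": x}
--                 stock.append(producto)
--
--     return stock
-- ===== SOURCE B (Python) =====
-- def generar_stock(marcas, colores, talles):
--     stock = [{}]
--     for key, values in (("brand", marcas), ("color", colores), ("talle", talles)):
--         stock = [{**p, key: v} for p in stock for v in values]
--     return stock
-- ===== Notes on version B (the rewrite author's own statement) =====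
-- stated objective: alternative
-- what changed: Replaces the three fixed nested loops with a fold over the list of (key, values) dimensions that grows a frontier of partial dicts, starting from [{}].
import Mathlib
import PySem

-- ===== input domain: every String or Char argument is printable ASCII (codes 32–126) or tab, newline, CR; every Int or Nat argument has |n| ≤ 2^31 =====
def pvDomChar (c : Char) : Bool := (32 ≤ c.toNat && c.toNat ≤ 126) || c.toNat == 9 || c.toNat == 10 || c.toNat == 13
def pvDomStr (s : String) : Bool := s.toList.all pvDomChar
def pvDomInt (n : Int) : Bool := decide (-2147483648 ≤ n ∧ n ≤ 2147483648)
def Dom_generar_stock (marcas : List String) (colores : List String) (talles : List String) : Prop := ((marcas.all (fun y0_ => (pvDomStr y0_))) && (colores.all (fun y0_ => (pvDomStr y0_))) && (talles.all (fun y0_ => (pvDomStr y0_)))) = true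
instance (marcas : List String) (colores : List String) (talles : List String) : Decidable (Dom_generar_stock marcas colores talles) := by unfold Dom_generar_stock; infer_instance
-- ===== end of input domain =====

-- B builds the product by folding over the ordered (key, values) dimensions, growing a
-- frontier of partial dicts from [{}], instead of A's three fixed nested loops (alternative decomposition).

-- ===== PORT A =====
def generar_stock (marcas : List String) (colores : List String) (talles : List String) : List (List (String × String)) :=
  marcas.foldl (fun stock marca =>
    colores.foldl (fun stock color =>
      talles.foldl (fun stock x =>
        stock ++ [[("brand", marca), ("color", color), ("talle", x)]]) stock) stock) []

-- ===== PORT B =====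
-- {**p, key: v} with a key not present in p appends the pair: exact here since the
-- three keys are pairwise distinct and each partial dict p holds only earlier keys.
def generar_stock_alt (marcas : List String) (colores : List String) (talles : List String) : List (List (String × String)) :=
  ([("brand", marcas), ("color", colores), ("talle", talles)] : List (String × List String)).foldl
    (fun stock kv => stock.flatMap (fun p => kv.2.map (fun v => p ++ [(kv.1, v)]))) [[]]

-- ===== PRECONDITION & SPEC =====
def Spec_generar_stock (marcas : List String) (colores : List String) (talles : List String) (out : List (List (String × String))) : Prop := out = generar_stock_alt marcas colores talles
instance (marcas : List String) (colores : List String) (talles : List String) (out : List (List (String × String))) : Decidable (Spec_generar_stock marcas colores talles out) := by unfold Spec_generar_stock; infer_instance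

-- ===== CLAIM (what is proved, stated in full; the proofs are below) =====
def Claim_equal_generar_stock : Prop := ∀ (marcas : List String) (colores : List String) (talles : List String), Dom_generar_stock marcas colores talles → Spec_generar_stock marcas colores talles (generar_stock marcas colores talles)

-- ===== LEMMAS AND PROOFS =====
lemma generar_stock_eq_flatMap (marcas colores talles : List String) :
    generar_stock marcas colores talles =
      marcas.flatMap (fun m => colores.flatMap (fun c =>
        talles.map (fun x => [("brand", m), ("color", c), ("talle", x)]))) := by
  unfold generar_stock
  rw [show (fun (stock : List (List (String × String))) (marca : String) =>
        colores.foldl (fun stock color =>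
          talles.foldl (fun stock x =>
            stock ++ [[("brand", marca), ("color", color), ("talle", x)]]) stock) stock)
      = (fun stock marca => stock ++ colores.flatMap (fun c =>
          talles.map (fun x => [("brand", marca), ("color", c), ("talle", x)]))) from ?_,
     PySem.List.foldl_append_eq_flatMap, List.nil_append]
  funext stock marca
  rw [show (fun (stock : List (List (String × String))) (color : String) =>
        talles.foldl (fun stock x =>
          stock ++ [[("brand", marca), ("color", color), ("talle", x)]]) stock)
      = (fun stock color => stock ++ talles.map (fun x =>
          [("brand", marca), ("color", color), ("talle", x)])) from ?_,
     PySem.List.foldl_append_eq_flatMap]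
  funext stock color
  rw [show (fun (stock : List (List (String × String))) (x : String) =>
        stock ++ [[("brand", marca), ("color", color), ("talle", x)]])
      = (fun stock x => stock ++ (fun x => [[("brand", marca), ("color", color), ("talle", x)]]) x) from rfl,
     PySem.List.foldl_append_eq_flatMap]
  induction talles <;> simp_all [List.flatMap]

lemma generar_stock_alt_eq_flatMap (marcas colores talles : List String) :
    generar_stock_alt marcas colores talles =
      marcas.flatMap (fun m => colores.flatMap (fun c =>
        talles.map (fun x => [("brand", m), ("color", c), ("talle", x)]))) := by
  simp [generar_stock_alt, List.foldl, List.flatMap_map, List.flatMap_assoc]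

-- ===== VERDICT (by name: the statement is the Claim_ definition above) =====
theorem generar_stock_spec : Claim_equal_generar_stock := by
  intro marcas colores talles _
  unfold Spec_generar_stock
  rw [generar_stock_eq_flatMap, generar_stock_alt_eq_flatMap]
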